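-- pv_equiv track=rewrite | github.com/Mick235711/Beijing-Subway-Tools | src/common/common.py | distribute_braces
-- ===== SOURCE A (Python) =====
-- from typing import TypeVar, Any
--
-- T = TypeVar("T")
--
-- possible_braces = ["()", "[]", "{}", "<>"]
--
-- def distribute_braces(values: dict[T, int]) -> dict[str, T]:
--     """ Distribute brace to values """
--     res: dict[str, T] = {}
--     values = dict(sorted(values.items(), key=lambda x: x[1], reverse=True))
--     for i, value in enumerate(values.keys()):
--         brace = possible_braces[i % len(possible_braces)]
--         brace_left, brace_right = brace[:len(brace) // 2], brace[len(brace) // 2:]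
--         multiplier = (i // len(possible_braces)) + 1
--         new_brace = brace_left * multiplier + brace_right * multiplier
--         res[new_brace] = value
--     return res
-- ===== SOURCE B (Python) =====
-- possible_braces = ["()", "[]", "{}", "<>"]
--
--
-- def distribute_braces(values):
--     """Distribute brace to values"""
--     # Rank-placement instead of sorting: each key's final position (its rank)
--     # is the number of items that come strictly before it in a stable
--     # descending order -- items with a larger value, plus earlier items with
--     # an equal value.  Place every key directly into its slot; no sort.
--     items = list(values.items())
--     n = len(items)
--     slots = [None] * n
--     for pos, (key, val) in enumerate(items):
--         rank = sum(1 for j, (_, v2) in enumerate(items)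
--                    if v2 > val or (v2 == val and j < pos))
--         left, right = possible_braces[rank % len(possible_braces)]
--         mult = rank // len(possible_braces) + 1
--         slots[rank] = (left * mult + right * mult, key)
--     return dict(slots)
-- ===== Notes on version B (the rewrite author's own statement) =====
-- stated objective: alternative
-- what changed: Replaces sort-then-enumerate by sort-free rank placement: each key's output position is computed directly as the count of items preceding it in stable descending order (larger value, or equal value and earlier), and the (brace, key) pair is written straight into that slot of a preallocated table.
import Mathlib
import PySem

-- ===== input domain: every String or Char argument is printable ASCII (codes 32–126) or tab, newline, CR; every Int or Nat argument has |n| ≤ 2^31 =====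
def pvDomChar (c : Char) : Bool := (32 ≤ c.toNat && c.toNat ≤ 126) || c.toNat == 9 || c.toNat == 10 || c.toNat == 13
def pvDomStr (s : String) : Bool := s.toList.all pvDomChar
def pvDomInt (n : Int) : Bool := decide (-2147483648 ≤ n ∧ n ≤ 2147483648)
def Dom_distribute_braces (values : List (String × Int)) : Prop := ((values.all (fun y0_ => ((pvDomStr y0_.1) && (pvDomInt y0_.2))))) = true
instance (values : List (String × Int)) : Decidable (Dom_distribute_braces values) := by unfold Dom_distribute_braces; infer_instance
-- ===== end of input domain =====

-- B replaces A's sort-then-enumerate by sort-free rank placement: each key's output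
-- position is computed directly as the count of items preceding it in stable descending
-- order, and the (brace, key) pair is written straight into that slot (alternative).

-- ===== PORT A =====
def possible_braces : List String := ["()", "[]", "{}", "<>"]

-- the body of A's loop computing the brace string for index i (Python string
-- repetition s*m ported exactly as pyRepeat on List Char, + as ++)
def newBraceA (i : Int) : String :=
  let brace := PySem.List.pyGetD possible_braces (PySem.Int.mod i (possible_braces.length : Int)) ""
  let half := PySem.Int.floordiv (PySem.Str.len brace) 2
  let brace_left := PySem.Str.slice brace none (some half)
  let brace_right := PySem.Str.slice brace (some half) none
  let multiplier := PySem.Int.floordiv i (possible_braces.length : Int) + 1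
  String.ofList (PySem.List.pyRepeat brace_left.toList multiplier ++
                 PySem.List.pyRepeat brace_right.toList multiplier)

def distribute_braces (values : List (String × Int)) : List (String × String) :=
  -- the parameter is a Python dict: interpret the association list under dict semantics
  let values0 : PySem.Dict String Int := PySem.Dict.ofList values
  let values1 : PySem.Dict String Int :=
    PySem.Dict.ofList (PySem.List.sorted values0.items (fun x => x.2) true)
  let res : PySem.Dict String String :=
    (PySem.List.enumerate values1.keys).foldl
      (fun res iv => res.insert (newBraceA iv.1) iv.2) PySem.Dict.empty
  res.items

-- ===== PORT B =====
-- B's rank of an item: sum(1 for j, (_, v2) in enumerate(items) if v2 > val or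
-- (v2 == val and j < pos)) — the 0/1-sum of a filtered generator is a countP
def rankB (items : List (String × Int)) (pos : Int) (v : Int) : Nat :=
  (PySem.List.enumerate items).countP
    (fun jp => decide (v < jp.2.2) || (jp.2.2 == v && decide (jp.1 < pos)))

-- B's brace string for a rank r (Python unpacks the 2-char brace string into
-- left, right; ported as .toList.getD 0 / 1 — every brace literal has 2 chars)
def braceB (r : Nat) : String :=
  let brace := (PySem.List.pyGetD possible_braces ((r % possible_braces.length : Nat) : Int) "").toList
  let mult := r / possible_braces.length + 1
  String.ofList (List.replicate mult (brace.getD 0 ' ') ++ List.replicate mult (brace.getD 1 ' '))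

def distribute_braces_alt (values : List (String × Int)) : List (String × String) :=
  -- the parameter is a Python dict: items = list(values.items()) under dict semantics
  let items := (PySem.Dict.ofList values).items
  -- slots = [None] * n; then slots[rank] = (brace_string, key) for each item
  let slots : List (Option (String × String)) :=
    (PySem.List.enumerate items).foldl
      (fun slots pv =>
        let r := rankB items pv.1 pv.2.2
        slots.set r (some (braceB r, pv.2.1)))
      (List.replicate items.length none)
  -- dict(slots): every slot is filled, since the ranks are a permutation of 0..n-1
  (PySem.Dict.ofList (slots.filterMap id)).items

-- ===== PRECONDITION & SPEC =====
def Spec_distribute_braces (values : List (String × Int)) (out : List (String × String)) : Prop := out = distribute_braces_alt values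
instance (values : List (String × Int)) (out : List (String × String)) : Decidable (Spec_distribute_braces values out) := by unfold Spec_distribute_braces; infer_instance

-- ===== CLAIM (what is proved, stated in full; the proofs are below) =====
def Claim_equal_distribute_braces : Prop := ∀ (values : List (String × Int)), Dom_distribute_braces values → Spec_distribute_braces values (distribute_braces values)

-- ===== LEMMAS AND PROOFS =====

-- the closed form both brace strings reduce to
def pcPair (r : Nat) : Char × Char :=
  match r with
  | 0 => ('(', ')') | 1 => ('[', ']') | 2 => ('{', '}') | _ => ('<', '>')

def gBrace (j : Nat) : String :=
  String.ofList (List.replicate (j / 4 + 1) (pcPair (j % 4)).1 ++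
                 List.replicate (j / 4 + 1) (pcPair (j % 4)).2)

lemma body_eq (c1 c2 : Char) (m : Nat) :
    String.ofList (PySem.List.pyRepeat (PySem.Str.slice (String.ofList [c1, c2]) none (some (PySem.Int.floordiv (PySem.Str.len (String.ofList [c1, c2])) 2))).toList ((m : Int) + 1) ++
                   PySem.List.pyRepeat (PySem.Str.slice (String.ofList [c1, c2]) (some (PySem.Int.floordiv (PySem.Str.len (String.ofList [c1, c2])) 2)) none).toList ((m : Int) + 1))
      = String.ofList (List.replicate (m + 1) c1 ++ List.replicate (m + 1) c2) := by
  have hlen : PySem.Str.len (String.ofList [c1, c2]) = 2 := by simp [PySem.Str.len_eq]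
  rw [hlen, show PySem.Int.floordiv 2 2 = 1 from by decide]
  simp [PySem.Str.slice]
  rw [show PySem.List.slice [c1,c2] none (some 1) = [c1] from by simp [PySem.List.slice],
      show PySem.List.slice [c1,c2] (some 1) none = [c2] from by simp [PySem.List.slice],
      PySem.List.pyRepeat_singleton, PySem.List.pyRepeat_singleton,
      show ((m:Int) + 1).toNat = m + 1 from by omega]

lemma newBraceA_eq (i : Nat) : newBraceA (i : Int) = gBrace i := by
  have h4 : i % 4 = 0 ∨ i % 4 = 1 ∨ i % 4 = 2 ∨ i % 4 = 3 := by omega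
  unfold newBraceA gBrace
  rw [show (possible_braces.length : Int) = ((4 : Nat) : Int) from by norm_num [possible_braces],
      PySem.Int.mod_natCast, PySem.Int.floordiv_natCast]
  rcases h4 with h|h|h|h
  · rw [h, show PySem.List.pyGetD possible_braces (((0:Nat):Int)) "" = String.ofList ['(', ')'] from by decide]
    simpa only [pcPair] using body_eq '(' ')' (i/4)
  · rw [h, show PySem.List.pyGetD possible_braces (((1:Nat):Int)) "" = String.ofList ['[', ']'] from by decide]
    simpa only [pcPair] using body_eq '[' ']' (i/4)
  · rw [h, show PySem.List.pyGetD possible_braces (((2:Nat):Int)) "" = String.ofList ['{', '}'] from by decide]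
    simpa only [pcPair] using body_eq '{' '}' (i/4)
  · rw [h, show PySem.List.pyGetD possible_braces (((3:Nat):Int)) "" = String.ofList ['<', '>'] from by decide]
    simpa only [pcPair] using body_eq '<' '>' (i/4)

lemma braceB_eq (r : Nat) : braceB r = gBrace r := by
  have h4 : r % 4 = 0 ∨ r % 4 = 1 ∨ r % 4 = 2 ∨ r % 4 = 3 := by omega
  unfold braceB gBrace
  rw [show possible_braces.length = 4 from rfl]
  rcases h4 with h|h|h|h <;> rw [h] <;> rfl

lemma gBrace_inj : Function.Injective gBrace := by
  intro a b h
  unfold gBrace at h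
  have h' := congrArg String.toList h
  simp only [String.toList_ofList] at h'
  have hlen := congrArg List.length h'
  simp [List.length_append, List.length_replicate] at hlen
  have hdiv : a / 4 = b / 4 := by omega
  have hhd : (pcPair (a % 4)).1 = (pcPair (b % 4)).1 := by
    have := congrArg (fun l => l.getD 0 ' ') h'
    simpa [List.getD, hdiv] using this
  have hm : a % 4 = b % 4 := by
    have ha : a % 4 < 4 := by omega
    have hb : b % 4 < 4 := by omega
    interval_cases h1 : a % 4 <;> interval_cases h2 : b % 4 <;> simp_all [pcPair]
  omega

lemma ofList_items_of_nodup {ν : Type} (l : List (String × ν)) (h : (l.map Prod.fst).Nodup) :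
    (PySem.Dict.ofList l).items = l := by
  have he : PySem.Dict.ofList l = l.foldl (fun (d : PySem.Dict String ν) p => d.insert p.1 p.2) PySem.Dict.empty := rfl
  rw [he]
  have := PySem.Dict.items_foldl_insert_fresh l Prod.fst Prod.snd (PySem.Dict.empty)
    (by intro a _; simp [PySem.Dict.contains_empty]) h
  simpa using this

-- snd components of zipIdx (the indices) are nodup
lemma zipIdx_snd_nodup {β : Type} (l : List β) : ((l.zipIdx).map Prod.snd).Nodup := by
  simp only [List.zipIdx_map_snd]
  exact List.nodup_range'

-- ---------- the mathematical rank and its bridge to B's port ----------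
def mrank (l : List (String × Int)) (pos : Nat) (v : Int) : Nat :=
  l.zipIdx.countP (fun q => decide (v < q.1.2) || (q.1.2 == v && decide (q.2 < pos)))

lemma rankB_eq_mrank (l : List (String × Int)) (pos : Nat) (v : Int) :
    rankB l ((pos : Nat) : Int) v = mrank l pos v := by
  unfold rankB mrank
  rw [PySem.List.enumerate_eq_zipIdx_map, List.countP_map]
  apply List.countP_congr
  intro q _
  simp [Function.comp]

-- rank of an old element after appending x at the end
lemma mrank_snoc_old (t : List (String × Int)) (x : String × Int) (pos : Nat) (v : Int)
    (hpos : pos < t.length) :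
    mrank (t ++ [x]) pos v = mrank t pos v + (if v < x.2 then 1 else 0) := by
  unfold mrank
  rw [List.zipIdx_append]
  simp only [Nat.zero_add]
  rw [List.countP_append]
  congr 1
  simp only [List.zipIdx_cons, List.zipIdx_nil, List.countP_cons, List.countP_nil]
  have hlt : ¬ (t.length < pos) := by omega
  by_cases hv : v < x.2
  · simp [hv]
  · simp [hv, hlt]

-- rank of the appended element x itself
lemma mrank_snoc_new (t : List (String × Int)) (x : String × Int) :
    mrank (t ++ [x]) t.length x.2 = t.countP (fun p => decide (x.2 ≤ p.2)) := by
  unfold mrank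
  rw [List.zipIdx_append]
  simp only [Nat.zero_add]
  rw [List.countP_append]
  have h2 : (([x].zipIdx t.length).countP
      (fun q => decide (x.2 < q.1.2) || (q.1.2 == x.2 && decide (q.2 < t.length)))) = 0 := by
    simp [List.zipIdx_cons]
  rw [h2, Nat.add_zero]
  have h1 : (t.zipIdx.countP
      (fun q => decide (x.2 < q.1.2) || (q.1.2 == x.2 && decide (q.2 < t.length))))
      = t.zipIdx.countP (fun q => decide (x.2 ≤ q.1.2)) := by
    apply List.countP_congr
    intro q hq
    obtain ⟨p, i⟩ := q
    have hlt : i < t.length := (List.mem_zipIdx' hq).1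
    by_cases h : x.2 ≤ p.2
    · rcases lt_or_eq_of_le h with h' | h'
      · simp [h, h']
      · simp [← h', hlt]
    · simp [h, show ¬ (x.2 < p.2) from by omega, show p.2 ≠ x.2 from by omega]
  rw [h1]
  have h3 := List.countP_map (p := fun p : String × Int => decide (x.2 ≤ p.2))
    (f := (Prod.fst : (String × Int) × Nat → String × Int)) (l := t.zipIdx)
  have h4 : t.zipIdx.map (Prod.fst : (String × Int) × Nat → String × Int) = t := by simp
  rw [h4] at h3
  exact h3.symm

-- index-shift for zipIdx under +1 on all indices
lemma zipIdx_shift {β : Type} (l : List β) : ∀ (off : Nat),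
    l.zipIdx (off + 1) = (l.zipIdx off).map (fun q => (q.1, q.2 + 1)) := by
  induction l with
  | nil => intro off; simp
  | cons y ys ih => intro off; simp [List.zipIdx_cons, ih (off + 1)]

-- stable descending insertion of x, as seen through (index, item) pairs
lemma key_insert (x : String × Int) : ∀ (s : List (String × Int)) (off : Nat),
    s.Pairwise (fun a b => b.2 ≤ a.2) →
    (((PySem.List.insertBy (fun a b => decide (b.2 < a.2)) x s).zipIdx off).map (fun q => (q.2, q.1))).Perm
      ((off + s.countP (fun p => decide (x.2 ≤ p.2)), x) ::
        ((s.zipIdx off).map (fun q => (q.2 + (if q.1.2 < x.2 then 1 else 0), q.1)))) := by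
  intro s
  induction s with
  | nil =>
    intro off _
    simp [PySem.List.insertBy, List.zipIdx_cons]
  | cons y ys ih =>
    intro off hp
    have hys : ys.Pairwise (fun a b => b.2 ≤ a.2) := hp.tail
    have hyall : ∀ z ∈ ys, z.2 ≤ y.2 := (List.pairwise_cons.mp hp).1
    have hstep : PySem.List.insertBy (fun a b => decide (b.2 < a.2)) x (y :: ys)
        = if decide (y.2 < x.2) = true then x :: y :: ys
          else y :: PySem.List.insertBy (fun a b => decide (b.2 < a.2)) x ys := rfl
    by_cases hb : y.2 < x.2
    · -- x goes in front; every element of y :: ys is strictly below x.2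
      have hcnt : (y :: ys).countP (fun p => decide (x.2 ≤ p.2)) = 0 := by
        rw [List.countP_eq_zero]
        intro p hpmem
        rcases List.mem_cons.mp hpmem with heq | hmem
        · subst heq; simp; omega
        · have := hyall _ hmem; simp; omega
      have hmap : ((y :: ys).zipIdx off).map (fun q => (q.2 + (if q.1.2 < x.2 then 1 else 0), q.1))
          = ((y :: ys).zipIdx (off + 1)).map (fun q => (q.2, q.1)) := by
        rw [zipIdx_shift (y :: ys) off, List.map_map]
        apply List.map_congr_left
        intro q hq
        obtain ⟨p, i⟩ := q
        have h' := List.mem_zipIdx hq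
        have hmem : p ∈ (y :: ys) := h'.2.2 ▸ List.getElem_mem _
        have hplt : p.2 < x.2 := by
          rcases List.mem_cons.mp hmem with heq | hmem'
          · subst heq; exact hb
          · exact lt_of_le_of_lt (hyall _ hmem') hb
        simp [Function.comp, hplt]
      rw [hstep, if_pos (by simpa using hb), hcnt, hmap, Nat.add_zero,
          show ((x :: y :: ys).zipIdx off) = (x, off) :: (y :: ys).zipIdx (off + 1) from List.zipIdx_cons,
          List.map_cons]
    · -- x stays behind y
      have hxy : x.2 ≤ y.2 := by omega
      have hcnt : (y :: ys).countP (fun p => decide (x.2 ≤ p.2))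
          = ys.countP (fun p => decide (x.2 ≤ p.2)) + 1 := by
        rw [List.countP_cons]; simp [hxy]
      rw [hstep, if_neg (by simpa using hb)]
      simp only [List.zipIdx_cons, List.map_cons]
      rw [if_neg hb, Nat.add_zero, hcnt,
          show off + (ys.countP (fun p => decide (x.2 ≤ p.2)) + 1)
             = off + 1 + ys.countP (fun p => decide (x.2 ≤ p.2)) from by omega]
      exact ((ih (off + 1) hys).cons _).trans (List.Perm.swap _ _ _)

-- sorted over a snoc is an insertBy into the sorted prefix
lemma sorted_snoc (t : List (String × Int)) (x : String × Int) :
    PySem.List.sorted (t ++ [x]) (fun p => p.2) true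
      = PySem.List.insertBy (fun a b => decide (b.2 < a.2)) x (PySem.List.sorted t (fun p => p.2) true) := by
  rw [PySem.List.sorted_rev_eq_foldl_insertBy (t ++ [x]), List.foldl_append,
      ← PySem.List.sorted_rev_eq_foldl_insertBy t]
  rfl

-- CORE: the (rank, item) pairs are a permutation of the (index, item) pairs of the sorted list
lemma core_perm (l : List (String × Int)) :
    ((l.zipIdx).map (fun q => (mrank l q.2 q.1.2, q.1))).Perm
      ((PySem.List.sorted l (fun p => p.2) true).zipIdx.map (fun q => (q.2, q.1))) := by
  induction l using List.reverseRecOn with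
  | nil => simp [show PySem.List.sorted ([] : List (String × Int)) (fun p => p.2) true = [] from rfl]
  | append_singleton t x ih =>
    rw [List.zipIdx_append, List.map_append]
    have hold : (t.zipIdx.map (fun q => (mrank (t ++ [x]) q.2 q.1.2, q.1)))
        = (t.zipIdx.map (fun q => (mrank t q.2 q.1.2, q.1))).map
            (fun rp => (rp.1 + (if rp.2.2 < x.2 then 1 else 0), rp.2)) := by
      rw [List.map_map]
      apply List.map_congr_left
      intro q hq
      obtain ⟨p, i⟩ := q
      have hlt : i < t.length := (List.mem_zipIdx' hq).1
      simp only [Function.comp]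
      rw [mrank_snoc_old t x i p.2 hlt]
    have hnew : (([x].zipIdx (0 + t.length)).map (fun q => (mrank (t ++ [x]) q.2 q.1.2, q.1)))
        = [(t.countP (fun p => decide (x.2 ≤ p.2)), x)] := by
      simp only [Nat.zero_add, List.zipIdx_cons, List.zipIdx_nil, List.map_cons, List.map_nil]
      rw [mrank_snoc_new]
    rw [hold, hnew, sorted_snoc]
    have hkey := key_insert x (PySem.List.sorted t (fun p => p.2) true) 0
      (PySem.List.sorted_pairwise_rev t (fun p => p.2))
    have hcntp : (PySem.List.sorted t (fun p => p.2) true).countP (fun p => decide (x.2 ≤ p.2))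
        = t.countP (fun p => decide (x.2 ≤ p.2)) :=
      (PySem.List.sorted_perm t (fun p => p.2) true).countP_eq _
    rw [hcntp, Nat.zero_add] at hkey
    have hmapped := ih.map (fun rp : Nat × (String × Int) => (rp.1 + (if rp.2.2 < x.2 then 1 else 0), rp.2))
    have hkey2 : (((PySem.List.insertBy (fun a b => decide (b.2 < a.2)) x
          (PySem.List.sorted t (fun p => p.2) true)).zipIdx).map (fun q => (q.2, q.1))).Perm
        ((t.countP (fun p => decide (x.2 ≤ p.2)), x) ::
          ((PySem.List.sorted t (fun p => p.2) true).zipIdx.map (fun q => (q.2, q.1))).map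
            (fun rp => (rp.1 + (if rp.2.2 < x.2 then 1 else 0), rp.2))) := by
      rw [List.map_map]
      exact hkey
    exact (hmapped.append_right _).trans ((List.perm_append_singleton _ _).trans hkey2.symm)

-- ---------- generic fill-by-index fold ----------
lemma foldl_set_get_none {β : Type} (ps : List (Nat × β)) : ∀ (acc : List (Option β)) (r : Nat),
    (∀ p ∈ ps, p.1 ≠ r) →
    (ps.foldl (fun a p => a.set p.1 (some p.2)) acc)[r]? = acc[r]? := by
  induction ps with
  | nil => intro acc r _; rfl
  | cons p ps ih =>
    intro acc r h
    rw [List.foldl_cons, ih _ r (fun q hq => h q (List.mem_cons_of_mem _ hq)),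
        List.getElem?_set_ne (h p (by simp))]

lemma foldl_set_get_some {β : Type} (ps : List (Nat × β)) (q : Nat × β) :
    ∀ (acc : List (Option β)), q ∈ ps → ((ps.map Prod.fst).Nodup) →
    (ps.foldl (fun a p => a.set p.1 (some p.2)) acc)[q.1]? =
      if q.1 < acc.length then some (some q.2) else none := by
  induction ps with
  | nil => intro acc hmem _; cases hmem
  | cons p ps ih =>
    intro acc hmem hn
    rw [List.foldl_cons]
    rcases List.mem_cons.mp hmem with heq | hmem'
    · subst heq
      have hrest : ∀ p' ∈ ps, p'.1 ≠ q.1 := by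
        intro p' hp' he
        exact (List.nodup_cons.mp hn).1 (he ▸ List.mem_map_of_mem hp')
      rw [foldl_set_get_none ps _ q.1 hrest]
      by_cases hr : q.1 < acc.length
      · rw [List.getElem?_set_self hr, if_pos hr]
      · rw [if_neg hr, List.getElem?_eq_none (by rw [List.length_set]; omega)]
    · rw [ih _ hmem' (List.nodup_cons.mp hn).2, List.length_set]

-- ---------- A's loop in closed form ----------
lemma enumA : ∀ (ks : List String) (st : Nat),
    (PySem.List.enumerate ks ((st : Nat) : Int)).map (fun iv => (newBraceA iv.1, iv.2))
      = (ks.zipIdx st).map (fun q => (gBrace q.2, q.1)) := by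
  intro ks
  induction ks with
  | nil => intro st; simp [PySem.List.enumerate_nil]
  | cons k t ih =>
    intro st
    rw [PySem.List.enumerate_cons, List.zipIdx_cons, List.map_cons, List.map_cons,
        newBraceA_eq st]
    congr 1
    rw [show ((st : Nat) : Int) + 1 = (((st + 1 : Nat)) : Int) from by push_cast; ring]
    exact ih (st + 1)

lemma A_core (l : List (String × Int)) (hnodup : (l.map (fun x => x.1)).Nodup) :
    ((PySem.List.enumerate (PySem.Dict.ofList (PySem.List.sorted l (fun x => x.2) true)).keys).foldl
        (fun res iv => res.insert (newBraceA iv.1) iv.2) (PySem.Dict.empty : PySem.Dict String String)).items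
      = (PySem.List.sorted l (fun x => x.2) true).zipIdx.map (fun q => (gBrace q.2, q.1.1)) := by
  have hs : ((PySem.List.sorted l (fun x => x.2) true).map (fun x => x.1)).Nodup :=
    (((PySem.List.sorted_perm l (fun x => x.2) true).map (fun x => x.1)).nodup_iff).mpr hnodup
  have hkeys : (PySem.Dict.ofList (PySem.List.sorted l (fun x => x.2) true)).keys
      = (PySem.List.sorted l (fun x => x.2) true).map (fun x => x.1) := by
    simp only [PySem.Dict.keys, ofList_items_of_nodup _ hs]
  rw [hkeys]
  have henum := enumA ((PySem.List.sorted l (fun x => x.2) true).map (fun x => x.1)) 0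
  rw [Nat.cast_zero] at henum
  have hnodupB : ((PySem.List.enumerate ((PySem.List.sorted l (fun x => x.2) true).map (fun x => x.1))).map
      (fun iv => newBraceA iv.1)).Nodup := by
    have h1 : (PySem.List.enumerate ((PySem.List.sorted l (fun x => x.2) true).map (fun x => x.1))).map
          (fun iv => newBraceA iv.1)
        = (((PySem.List.sorted l (fun x => x.2) true).map (fun x => x.1)).zipIdx.map Prod.snd).map gBrace := by
      have e1 : (PySem.List.enumerate ((PySem.List.sorted l (fun x => x.2) true).map (fun x => x.1))).map
            (fun iv => newBraceA iv.1)
          = ((PySem.List.enumerate ((PySem.List.sorted l (fun x => x.2) true).map (fun x => x.1))).map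
              (fun iv => (newBraceA iv.1, iv.2))).map Prod.fst := by
        rw [List.map_map]; rfl
      rw [e1, henum, List.map_map, List.map_map]
      rfl
    rw [h1]
    exact List.Nodup.map gBrace_inj (zipIdx_snd_nodup _)
  have hA := PySem.Dict.items_foldl_insert_fresh
      (PySem.List.enumerate ((PySem.List.sorted l (fun x => x.2) true).map (fun x => x.1)))
      (fun iv => newBraceA iv.1) (fun iv => iv.2) (PySem.Dict.empty : PySem.Dict String String)
      (by intro a _; simp [PySem.Dict.contains_empty]) hnodupB
  rw [hA]
  have hemp : (PySem.Dict.empty : PySem.Dict String String).items = [] := rfl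
  rw [hemp, List.nil_append]
  have hfinal : (((PySem.List.sorted l (fun x => x.2) true).map (fun x => x.1)).zipIdx.map
        (fun q => (gBrace q.2, q.1)))
      = (PySem.List.sorted l (fun x => x.2) true).zipIdx.map (fun q => (gBrace q.2, q.1.1)) := by
    rw [List.zipIdx_map, List.map_map]
    apply List.map_congr_left
    intro q _
    rfl
  exact henum.trans hfinal

-- ---------- B's loop in closed form ----------
lemma B_core (l : List (String × Int)) :
    (PySem.Dict.ofList
      (((PySem.List.enumerate l).foldl
        (fun slots pv => slots.set (rankB l pv.1 pv.2.2) (some (braceB (rankB l pv.1 pv.2.2), pv.2.1)))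
        (List.replicate l.length (none : Option (String × String)))).filterMap id)).items
      = (PySem.List.sorted l (fun x => x.2) true).zipIdx.map (fun q => (gBrace q.2, q.1.1)) := by
  have hlen_s : (PySem.List.sorted l (fun x => x.2) true).length = l.length :=
    (PySem.List.sorted_perm l (fun x => x.2) true).length_eq
  have hfold : (PySem.List.enumerate l).foldl
        (fun slots pv => slots.set (rankB l pv.1 pv.2.2) (some (braceB (rankB l pv.1 pv.2.2), pv.2.1)))
        (List.replicate l.length (none : Option (String × String)))
      = ((PySem.List.enumerate l).map
          (fun pv => (rankB l pv.1 pv.2.2, (braceB (rankB l pv.1 pv.2.2), pv.2.1)))).foldl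
          (fun a p => a.set p.1 (some p.2)) (List.replicate l.length none) := by
    rw [List.foldl_map]
  set ps := (PySem.List.enumerate l).map
      (fun pv => (rankB l pv.1 pv.2.2, (braceB (rankB l pv.1 pv.2.2), pv.2.1))) with hpsdef
  have hps : ps = (l.zipIdx.map (fun q => (mrank l q.2 q.1.2, q.1))).map
      (fun rp => (rp.1, (braceB rp.1, rp.2.1))) := by
    rw [hpsdef, PySem.List.enumerate_eq_zipIdx_map, List.map_map, List.map_map]
    apply List.map_congr_left
    intro q _
    simp only [Function.comp]
    rw [show (0 : Int) + (q.2 : Int) = ((q.2 : Nat) : Int) from by omega, rankB_eq_mrank]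
  have hperm : ps.Perm ((PySem.List.sorted l (fun x => x.2) true).zipIdx.map
      (fun q => (q.2, (braceB q.2, q.1.1)))) := by
    rw [hps, List.map_map]
    have h := (core_perm l).map (fun rp : Nat × (String × Int) => (rp.1, (braceB rp.1, rp.2.1)))
    rw [List.map_map, List.map_map] at h
    exact h
  have hnodup_fst : (ps.map Prod.fst).Nodup := by
    apply ((hperm.map Prod.fst).nodup_iff).mpr
    have h : ((PySem.List.sorted l (fun x => x.2) true).zipIdx.map
          (fun q => (q.2, (braceB q.2, q.1.1)))).map Prod.fst
        = (PySem.List.sorted l (fun x => x.2) true).zipIdx.map Prod.snd := by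
      rw [List.map_map]; rfl
    rw [h]
    exact zipIdx_snd_nodup _
  have hget : ∀ r : Nat,
      (ps.foldl (fun a p => a.set p.1 (some p.2)) (List.replicate l.length (none : Option (String × String))))[r]?
        = ((PySem.List.sorted l (fun x => x.2) true).zipIdx.map (fun q => some (braceB q.2, q.1.1)))[r]? := by
    intro r
    by_cases hr : r < l.length
    · have hrs : r < (PySem.List.sorted l (fun x => x.2) true).length := by omega
      have h0 : r < ((PySem.List.sorted l (fun x => x.2) true).zipIdx).length := by
        rw [List.length_zipIdx]; omega
      have hzmem : (((PySem.List.sorted l (fun x => x.2) true)[r]'hrs), 0 + r)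
          ∈ (PySem.List.sorted l (fun x => x.2) true).zipIdx := by
        have hm := List.getElem_mem h0
        rwa [List.getElem_zipIdx h0] at hm
      have hmemps : ((0 + r : Nat),
            (braceB (0 + r), ((PySem.List.sorted l (fun x => x.2) true)[r]'hrs).1)) ∈ ps :=
        (hperm.mem_iff).mpr (List.mem_map.mpr ⟨_, hzmem, rfl⟩)
      have hsome := foldl_set_get_some ps
        ((0 + r : Nat), (braceB (0 + r), ((PySem.List.sorted l (fun x => x.2) true)[r]'hrs).1))
        (List.replicate l.length (none : Option (String × String))) hmemps hnodup_fst
      simp only [Nat.zero_add] at hsome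
      rw [hsome, List.length_replicate, if_pos hr,
          List.getElem?_map, List.getElem?_zipIdx, List.getElem?_eq_getElem hrs]
      simp
    · have hall : ∀ p ∈ ps, p.1 ≠ r := by
        intro q hqmem
        obtain ⟨w, hwmem, hwe⟩ := List.mem_map.mp ((hperm.mem_iff).mp hqmem)
        obtain ⟨w1, w2⟩ := w
        have hw := List.mem_zipIdx' hwmem
        rw [← hwe]
        simp only
        omega
      rw [foldl_set_get_none ps _ r hall,
          List.getElem?_eq_none (by rw [List.length_replicate]; omega),
          List.getElem?_eq_none (by rw [List.length_map, List.length_zipIdx]; omega)]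
  have hslots : ps.foldl (fun a p => a.set p.1 (some p.2))
        (List.replicate l.length (none : Option (String × String)))
      = (PySem.List.sorted l (fun x => x.2) true).zipIdx.map (fun q => some (braceB q.2, q.1.1)) :=
    List.ext_getElem? hget
  rw [hfold, hslots]
  have hfm : ((PySem.List.sorted l (fun x => x.2) true).zipIdx.map
        (fun q => some (braceB q.2, q.1.1))).filterMap id
      = (PySem.List.sorted l (fun x => x.2) true).zipIdx.map (fun q => (braceB q.2, q.1.1)) := by
    rw [List.filterMap_map]
    simp [Function.comp]
  rw [hfm]
  have hfst : (((PySem.List.sorted l (fun x => x.2) true).zipIdx.map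
      (fun q => (braceB q.2, q.1.1))).map Prod.fst).Nodup := by
    have h : ((PySem.List.sorted l (fun x => x.2) true).zipIdx.map
          (fun q => (braceB q.2, q.1.1))).map Prod.fst
        = ((PySem.List.sorted l (fun x => x.2) true).zipIdx.map Prod.snd).map braceB := by
      rw [List.map_map, List.map_map]; rfl
    rw [h]
    refine List.Nodup.map ?_ (zipIdx_snd_nodup _)
    intro a b hab
    apply gBrace_inj
    rwa [braceB_eq, braceB_eq] at hab
  rw [ofList_items_of_nodup _ hfst]
  apply List.map_congr_left
  intro q _
  rw [braceB_eq]

lemma A_eq (values : List (String × Int)) :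
    distribute_braces values
      = (PySem.List.sorted (PySem.Dict.ofList values).items (fun x => x.2) true).zipIdx.map
          (fun q => (gBrace q.2, q.1.1)) :=
  A_core (PySem.Dict.ofList values).items (PySem.Dict.nodup_keys_ofList values)

lemma B_eq (values : List (String × Int)) :
    distribute_braces_alt values
      = (PySem.List.sorted (PySem.Dict.ofList values).items (fun x => x.2) true).zipIdx.map
          (fun q => (gBrace q.2, q.1.1)) :=
  B_core (PySem.Dict.ofList values).items

-- ===== VERDICT (by name: the statement is the Claim_ definition above) =====
theorem distribute_braces_spec : Claim_equal_distribute_braces := by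
  intro values _
  unfold Spec_distribute_braces
  rw [A_eq values, B_eq values]
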